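-- pv_equiv track=rewrite | github.com/delli-88/dsa_coding | two_pointers/triplet_with_max_sum.py | maxSumTriplet
-- ===== SOURCE A (Python) =====
-- from typing import List
--
-- def maxSumTriplet(n: int, arr: List[int]) -> int:
--     maxi = 0
--     for j in range(1,n-1):
--         middle = arr[j]
--
--         first = 0
--         for i in range(j):
--             if arr[i]<middle and arr[i]>first:
--                 first = arr[i]
--
--         last = 0
--         for k in range(j+1,n):
--             if arr[k]>middle and arr[k]>last:
--                 last = arr[k]
--
--         if first!=0 and last!=0:
--             maxi = max(maxi,first+middle+last)
--
--     return maxi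
-- ===== SOURCE B (Python) =====
-- from typing import List
--
-- def _bisect_left(sl: List[int], x: int) -> int:
--     lo, hi = 0, len(sl)
--     while lo < hi:
--         mid = (lo + hi) // 2
--         if sl[mid] < x:
--             lo = mid + 1
--         else:
--             hi = mid
--     return lo
--
-- def maxSumTriplet(n: int, arr: List[int]) -> int:
--     if n < 3:
--         return 0
--     a = arr[:n]
--     # suf[j] = largest positive value in a[j+1:], or 0 if there is none
--     suf = [0] * n
--     for j in range(n - 2, -1, -1):
--         v = a[j + 1]
--         suf[j] = max(suf[j + 1], v if v > 0 else 0)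
--     sl = [a[0]]  # sorted list of the elements left of position j
--     maxi = 0
--     for j in range(1, n - 1):
--         middle = a[j]
--         idx = _bisect_left(sl, middle)
--         first = sl[idx - 1] if idx > 0 and sl[idx - 1] > 0 else 0
--         last = suf[j] if suf[j] > middle and suf[j] > 0 else 0
--         if first != 0 and last != 0:
--             maxi = max(maxi, first + middle + last)
--         sl.insert(idx, middle)
--     return maxi
-- ===== Notes on version B (the rewrite author's own statement) =====
-- stated objective: faster
-- what changed: A's two O(n) inner scans per middle element are replaced by a precomputed suffix-positive-max array (best right element) and an incrementally maintained sorted list queried by binary search (best positive element smaller than the middle).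
import Mathlib
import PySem

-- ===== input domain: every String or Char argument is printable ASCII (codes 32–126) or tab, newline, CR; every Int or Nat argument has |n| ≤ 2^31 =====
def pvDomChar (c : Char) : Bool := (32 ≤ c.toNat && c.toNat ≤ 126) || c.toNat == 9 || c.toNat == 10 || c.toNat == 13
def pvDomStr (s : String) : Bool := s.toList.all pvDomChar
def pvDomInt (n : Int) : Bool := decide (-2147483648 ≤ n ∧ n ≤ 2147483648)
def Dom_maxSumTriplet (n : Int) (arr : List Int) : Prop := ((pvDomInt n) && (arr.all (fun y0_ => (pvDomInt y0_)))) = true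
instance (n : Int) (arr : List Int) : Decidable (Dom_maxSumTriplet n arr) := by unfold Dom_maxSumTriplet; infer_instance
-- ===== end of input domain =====

-- B replaces A's two inner scans per middle element by a suffix-positive-max array and a
-- binary-searched sorted list of the prefix (objective: faster); return values proved equal on Pre_.

-- ===== PORT A =====
-- loop body of A's outer 'for j in range(1, n-1)' loop
def pvStepA (arr : List Int) (n : Int) (maxi j : Int) : Int :=
  let middle := PySem.List.pyGetD arr j 0
  let first := (PySem.List.pyRange 0 j 1).foldl (fun first i =>
      let ai := PySem.List.pyGetD arr i 0
      if ai < middle ∧ first < ai then ai else first) 0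
  let last := (PySem.List.pyRange (j+1) n 1).foldl (fun last k =>
      let ak := PySem.List.pyGetD arr k 0
      if middle < ak ∧ last < ak then ak else last) 0
  if first ≠ 0 ∧ last ≠ 0 then max maxi (first + middle + last) else maxi

def maxSumTriplet (n : Int) (arr : List Int) : Int :=
  (PySem.List.pyRange 1 (n-1) 1).foldl (pvStepA arr n) 0

-- ===== PORT B =====
-- running recurrence of Source B's backward suffix loop: suf[j] = max(suf[j+1], a[j+1] if positive)
def pvMpos : List Int → Int
  | [] => 0
  | v :: t => max (pvMpos t) (if 0 < v then v else 0)

-- the suffix array Source B fills backward: (pvSuf a)[j] = pvMpos (a[j+1:])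
def pvSuf : List Int → List Int
  | [] => []
  | _ :: t => pvMpos t :: pvSuf t

-- loop body of Source B's 'for j in range(1, n-1)' loop; state = (sorted prefix list, maxi)
def pvStepB (a suf : List Int) (st : List Int × Int) (j : Int) : List Int × Int :=
  let sl := st.1
  let middle := PySem.List.pyGetD a j 0
  let idx := PySem.List.bisectLeft sl middle
  let first := if 0 < idx ∧ 0 < PySem.List.pyGetD sl ((idx : Int) - 1) 0 then
      PySem.List.pyGetD sl ((idx : Int) - 1) 0 else 0
  let sufj := PySem.List.pyGetD suf j 0
  let last := if middle < sufj ∧ 0 < sufj then sufj else 0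
  let maxi := if first ≠ 0 ∧ last ≠ 0 then max st.2 (first + middle + last) else st.2
  (PySem.List.insert sl (idx : Int) middle, maxi)

def maxSumTriplet_alt (n : Int) (arr : List Int) : Int :=
  if n < 3 then 0
  else
    let a := PySem.List.slice arr none (some n)
    let suf := pvSuf a
    ((PySem.List.pyRange 1 (n-1) 1).foldl (pvStepB a suf)
      ([PySem.List.pyGetD a 0 0], 0)).2

-- ===== PRECONDITION & SPEC =====
-- A raises IndexError whenever n ≥ 3 and n exceeds len(arr); those inputs are excluded.
def Pre_maxSumTriplet (n : Int) (arr : List Int) : Prop := 3 ≤ n → n ≤ (arr.length : Int)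
instance (n : Int) (arr : List Int) : Decidable (Pre_maxSumTriplet n arr) := by
  unfold Pre_maxSumTriplet; infer_instance

def pvWitness_maxSumTriplet : Int × List Int := (3, [1, 2, 3])

def Spec_maxSumTriplet (n : Int) (arr : List Int) (out : Int) : Prop := out = maxSumTriplet_alt n arr
instance (n : Int) (arr : List Int) (out : Int) : Decidable (Spec_maxSumTriplet n arr out) := by
  unfold Spec_maxSumTriplet; infer_instance

-- ===== CLAIM (what is proved, stated in full; the proofs are below) =====
def Claim_equal_maxSumTriplet : Prop := ∀ (n : Int) (arr : List Int), Dom_maxSumTriplet n arr → Pre_maxSumTriplet n arr → Spec_maxSumTriplet n arr (maxSumTriplet n arr)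

-- ===== LEMMAS AND PROOFS =====

lemma pvMpos_nonneg (l : List Int) : 0 ≤ pvMpos l := by
  induction l with
  | nil => simp [pvMpos]
  | cons v t ih => simp [pvMpos]; omega

-- a prefix element read through the full list
lemma pv_get_take (xs : List Int) (t : Nat) (i : Int) (h0 : 0 ≤ i) (h1 : i < (t : Int))
    (h2 : t ≤ xs.length) : PySem.List.pyGetD (xs.take t) i 0 = PySem.List.pyGetD xs i 0 := by
  rw [PySem.List.pyGetD_eq_getElem _ _ h0 (by simp; omega),
      PySem.List.pyGetD_eq_getElem _ _ h0 (by omega)]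
  exact List.getElem_take

lemma pv_suf_get (l : List Int) (k : Nat) (hk : k < l.length) :
    (pvSuf l).getD k 0 = pvMpos (l.drop (k+1)) := by
  induction l generalizing k with
  | nil => simp at hk
  | cons x t ih =>
    cases k with
    | zero => simp [pvSuf]
    | succ k => simpa [pvSuf] using ih k (by simpa using hk)

-- splitting a running max
lemma pv_foldl_max_split (l : List Int) (a b : Int) :
    l.foldl max (max a b) = max a (l.foldl max b) := by
  induction l generalizing b with
  | nil => simp
  | cons x t ih => simp only [List.foldl_cons, max_assoc, ih]

-- a running max over a sorted list is its last element
lemma pv_foldl_max_sorted (l : List Int) (h : l ≠ []) (hs : l.Pairwise (· ≤ ·)) (init : Int) :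
    l.foldl max init = max init (l.getLast h) := by
  induction l generalizing init with
  | nil => simp at h
  | cons x t ih =>
    rcases List.eq_nil_or_concat' t with rfl | _
    · simp
    · have ht : t ≠ [] := by rename_i h'; rcases h' with ⟨_, _, rfl⟩; simp
      have hxt : ∀ y ∈ t, x ≤ y := (List.pairwise_cons.mp hs).1
      rw [List.getLast_cons ht, List.foldl_cons, ih ht (List.pairwise_cons.mp hs).2]
      have := hxt _ (List.getLast_mem ht)
      omega

-- A's guarded update is a guarded running max
lemma pv_step_max (p : Int → Prop) [DecidablePred p] (l : List Int) (init : Int) :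
    l.foldl (fun f a => if p a ∧ f < a then a else f) init
      = (l.filter (fun a => decide (p a))).foldl max init := by
  rw [← PySem.List.foldl_ite_eq_foldl_filter p max l init]
  exact PySem.List.foldl_congr_mem l _ _ init
    (by intro acc x _; by_cases h : p x <;> simp [h]; omega)

-- characterisation of A's inner 'last' scan by the suffix positive maximum
lemma pv_last_char (m : Int) (l : List Int) :
    l.foldl (fun f a => if m < a ∧ f < a then a else f) 0
      = if m < pvMpos l ∧ 0 < pvMpos l then pvMpos l else 0 := by
  have key : ∀ (l : List Int),
      (l.filter (fun a => decide (m < a))).foldl max 0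
        = if m < pvMpos l ∧ 0 < pvMpos l then pvMpos l else 0 := by
    intro l
    induction l with
    | nil => simp [pvMpos]
    | cons v t ih =>
      have hnn := pvMpos_nonneg t
      by_cases hv : m < v
      · rw [List.filter_cons_of_pos (by simpa using hv), List.foldl_cons,
            show max (0:Int) v = max v 0 from max_comm _ _, pv_foldl_max_split, ih]
        simp only [pvMpos]; split_ifs <;> omega
      · rw [List.filter_cons_of_neg (by simpa using hv), ih]
        simp only [pvMpos]; split_ifs <;> omega
  rw [pv_step_max (fun a => m < a), key]

-- the sorted-prefix invariant carried by B's loop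
def pvInv (pre sl : List Int) : Prop := sl.Perm pre ∧ sl.Pairwise (· ≤ ·)

-- bisectLeft splits the filter of a sorted list
lemma pv_filter_sorted (sl : List Int) (m : Int) (hs : sl.Pairwise (· ≤ ·)) :
    sl.filter (fun a => decide (a < m)) = sl.take (PySem.List.bisectLeft sl m) := by
  obtain ⟨hle, hlt, hge⟩ := PySem.List.bisectLeft_spec sl m hs
  set idx := PySem.List.bisectLeft sl m with hidx
  conv_lhs => rw [← List.take_append_drop idx sl]
  rw [List.filter_append]
  have h1 : (sl.take idx).filter (fun a => decide (a < m)) = sl.take idx := by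
    apply List.filter_eq_self.mpr
    intro y hy
    obtain ⟨i, hi, rfl⟩ := List.mem_iff_getElem.mp hy
    have hi' : i < idx := by simp at hi; omega
    simp only [List.getElem_take]
    exact decide_eq_true (hlt i (by simp at hi; omega) hi')
  have h2 : (sl.drop idx).filter (fun a => decide (a < m)) = [] := by
    apply List.filter_eq_nil_iff.mpr
    intro y hy
    obtain ⟨i, hi, rfl⟩ := List.mem_iff_getElem.mp hy
    rw [List.getElem_drop]
    have := hge (idx + i) (by simp at hi; omega) (by omega)
    simp; omega
  rw [h1, h2, List.append_nil]

-- B's binary-searched predecessor equals A's prefix scan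
lemma pv_first_eq (pre sl : List Int) (m : Int) (hinv : pvInv pre sl) :
    (pre.foldl (fun f a => if a < m ∧ f < a then a else f) 0)
      = (if 0 < PySem.List.bisectLeft sl m ∧
            0 < PySem.List.pyGetD sl ((PySem.List.bisectLeft sl m : Int) - 1) 0 then
          PySem.List.pyGetD sl ((PySem.List.bisectLeft sl m : Int) - 1) 0 else 0) := by
  obtain ⟨hperm, hs⟩ := hinv
  obtain ⟨hle, hlt, hge⟩ := PySem.List.bisectLeft_spec sl m hs
  set idx := PySem.List.bisectLeft sl m with hidx
  rw [pv_step_max (fun a => a < m)]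
  have hpf : (pre.filter (fun a => decide (a < m))).foldl max 0
      = (sl.filter (fun a => decide (a < m))).foldl max 0 :=
    List.Perm.foldl_op_eq ((hperm.symm).filter _)
  rw [hpf, pv_filter_sorted sl m hs]
  by_cases h0 : 0 < idx
  · have hlen : (sl.take idx).length = idx := by simp; omega
    have hne : sl.take idx ≠ [] := by
      intro h; rw [h] at hlen; simp at hlen; omega
    have hsort : (sl.take idx).Pairwise (· ≤ ·) := hs.sublist (List.take_sublist _ _)
    rw [pv_foldl_max_sorted _ hne hsort 0]
    have hgl : (sl.take idx).getLast hne = sl[idx - 1]'(by omega) := by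
      rw [List.getLast_eq_getElem]
      simp only [hlen]
      exact List.getElem_take
    have hget : PySem.List.pyGetD sl ((idx : Int) - 1) 0 = sl[idx - 1]'(by omega) := by
      have : ((idx : Int) - 1) = ((idx - 1 : Nat) : Int) := by omega
      rw [this, PySem.List.pyGetD_eq_getElem _ _ (by omega) (by simp; omega)]
      simp
    simp only [hget, hgl]
    split_ifs <;> omega
  · have h0' : idx = 0 := by omega
    rw [if_neg (by omega), ← hidx, h0']
    simp

-- inserting at the bisect position keeps the invariant
lemma pv_insert_inv (pre sl : List Int) (m : Int) (hinv : pvInv pre sl) :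
    pvInv (pre ++ [m]) (PySem.List.insert sl (PySem.List.bisectLeft sl m : Int) m) := by
  obtain ⟨hperm, hs⟩ := hinv
  obtain ⟨hle, hlt, hge⟩ := PySem.List.bisectLeft_spec sl m hs
  set idx := PySem.List.bisectLeft sl m with hidx
  rw [PySem.List.insert_natCast sl idx m hle]
  constructor
  · have h1 : (sl.take idx ++ m :: sl.drop idx).Perm (m :: sl) := by
      have h2 := (List.perm_middle (a := m) (l₁ := sl.take idx) (l₂ := sl.drop idx))
      simpa [List.take_append_drop] using h2
    exact h1.trans ((hperm.cons m).trans (List.perm_append_singleton m pre).symm)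
  · have htake : ∀ y ∈ sl.take idx, y < m := by
      intro y hy
      obtain ⟨i, hi, rfl⟩ := List.mem_iff_getElem.mp hy
      simp only [List.getElem_take]
      exact hlt i (by simp at hi; omega) (by simp at hi; omega)
    have hdrop : ∀ y ∈ sl.drop idx, m ≤ y := by
      intro y hy
      obtain ⟨i, hi, rfl⟩ := List.mem_iff_getElem.mp hy
      rw [List.getElem_drop]
      exact hge (idx + i) (by simp at hi; omega) (by omega)
    rw [List.pairwise_append]
    refine ⟨hs.sublist (List.take_sublist _ _), ?_, ?_⟩
    · rw [List.pairwise_cons]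
      exact ⟨hdrop, hs.sublist (List.drop_sublist _ _)⟩
    · intro u hu v hv
      rcases List.mem_cons.mp hv with rfl | hv
      · exact le_of_lt (htake u hu)
      · exact le_of_lt (lt_of_lt_of_le (htake u hu) (hdrop v hv))

-- a Python index loop over a segment is a fold over that segment
lemma pv_suf_length (l : List Int) : (pvSuf l).length = l.length := by
  induction l with
  | nil => rfl
  | cons x t ih => simp [pvSuf, ih]

lemma pv_fold_seg (arr : List Int) (t : Nat) (ht : t ≤ arr.length) (aa : Int) (h0 : 0 ≤ aa)
    (f : Int → Int → Int) (init : Int) :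
    (PySem.List.pyRange aa (t : Int) 1).foldl
        (fun acc i => f acc (PySem.List.pyGetD arr i 0)) init
      = ((arr.take t).drop aa.toNat).foldl f init := by
  have hlen : ((arr.take t).length : Int) = (t : Int) := by simp; omega
  rw [← hlen,
      PySem.List.foldl_congr_mem _ _ (fun acc i => f acc (PySem.List.pyGetD (arr.take t) i 0))
        init ?_]
  · exact PySem.List.foldl_pyRange_pyGetD' (arr.take t) 0 f init h0
  · intro acc x hx
    rw [PySem.List.mem_pyRange_one] at hx
    simp only [List.length_take] at hx
    exact congrArg (f acc) (pv_get_take arr t x (by omega) (by omega) ht).symm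

-- one step of the two loops agrees, and the invariant is preserved
lemma pv_step (arr : List Int) (n j : Int) (acc : Int) (sl : List Int)
    (h3 : 3 ≤ n) (hlen : n ≤ (arr.length : Int)) (hj1 : 1 ≤ j) (hjn : j < n - 1)
    (hinv : pvInv ((arr.take n.toNat).take j.toNat) sl) :
    pvStepA arr n acc j = (pvStepB (arr.take n.toNat) (pvSuf (arr.take n.toNat)) (sl, acc) j).2
    ∧ pvInv ((arr.take n.toNat).take (j+1).toNat)
        (pvStepB (arr.take n.toNat) (pvSuf (arr.take n.toNat)) (sl, acc) j).1 := by
  set N := n.toNat with hN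
  set a := arr.take N with ha
  set jn := j.toNat with hjn
  have hNlen : N ≤ arr.length := by omega
  have haN : a.length = N := by simp [ha]; omega
  have hjN : jn < N - 1 := by omega
  have hcastN : ((N : Nat) : Int) = n := by omega
  have hcastj : ((jn : Nat) : Int) = j := by omega
  -- the middle element, read through arr and through a
  have hmid : PySem.List.pyGetD a j 0 = PySem.List.pyGetD arr j 0 :=
    pv_get_take arr N j (by omega) (by omega) hNlen
  have hmidel : PySem.List.pyGetD a j 0 = a[jn]'(by omega) := by
    rw [PySem.List.pyGetD_eq_getElem a 0 (by omega) (by omega)]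
  set m := PySem.List.pyGetD arr j 0 with hm
  -- A's first scan over the prefix
  have hfirstA : (PySem.List.pyRange 0 j 1).foldl (fun first i =>
      let ai := PySem.List.pyGetD arr i 0
      if ai < m ∧ first < ai then ai else first) 0
      = (a.take jn).foldl (fun f x => if x < m ∧ f < x then x else f) 0 := by
    have := pv_fold_seg arr jn (by omega) 0 le_rfl
      (fun f x => if x < m ∧ f < x then x else f) 0
    rw [hcastj] at this
    rw [this]
    simp only [Int.toNat_zero, List.drop_zero]
    rw [ha, List.take_take, Nat.min_eq_left (by omega)]
  -- A's last scan over the suffix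
  have hlastA : (PySem.List.pyRange (j+1) n 1).foldl (fun last k =>
      let ak := PySem.List.pyGetD arr k 0
      if m < ak ∧ last < ak then ak else last) 0
      = (a.drop (jn+1)).foldl (fun f x => if m < x ∧ f < x then x else f) 0 := by
    have := pv_fold_seg arr N hNlen (j+1) (by omega)
      (fun f x => if m < x ∧ f < x then x else f) 0
    rw [hcastN] at this
    rw [this, ha, show (j+1).toNat = jn + 1 from by omega]
  -- B's suffix-array entry
  have hsuf : PySem.List.pyGetD (pvSuf a) j 0 = pvMpos (a.drop (jn+1)) := by
    rw [PySem.List.pyGetD_eq_getElem (pvSuf a) 0 (by omega)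
        (by rw [pv_suf_length]; omega)]
    rw [← List.getD_eq_getElem (pvSuf a) 0 (by rw [pv_suf_length]; omega)]
    exact pv_suf_get a jn (by omega)
  -- the two step values agree
  refine ⟨?_, ?_⟩
  · show pvStepA arr n acc j = _
    simp only [pvStepA, pvStepB, ← hm, hmid, hsuf, hfirstA, hlastA]
    rw [pv_first_eq (a.take jn) sl m hinv, pv_last_char m (a.drop (jn+1))]
  · simp only [pvStepB, hmid]
    have := pv_insert_inv (a.take jn) sl m hinv
    have htake : a.take (jn+1) = a.take jn ++ [a[jn]'(by omega)] := by
      rw [List.take_add_one]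
      simp [List.getElem?_eq_getElem (show jn < a.length by omega)]
    have hj1 : (j+1).toNat = jn + 1 := by omega
    rw [hj1, htake]
    have hma : m = a[jn]'(by omega) := by rw [← hmidel, hmid]
    rw [← hma]
    exact this

-- the two loops agree from any position j with the invariant
lemma pv_main (arr : List Int) (n : Int) (h3 : 3 ≤ n) (hlen : n ≤ (arr.length : Int)) :
    ∀ (k : Nat) (j : Int), 1 ≤ j → j + k = n - 1 → ∀ (acc : Int) (sl : List Int),
    pvInv ((arr.take n.toNat).take j.toNat) sl →
    (PySem.List.pyRange j (n-1) 1).foldl (pvStepA arr n) acc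
      = ((PySem.List.pyRange j (n-1) 1).foldl
          (pvStepB (arr.take n.toNat) (pvSuf (arr.take n.toNat))) (sl, acc)).2 := by
  intro k
  induction k with
  | zero =>
    intro j hj1 hjk acc sl hinv
    rw [PySem.List.pyRange_one_eq_nil (by omega)]
    simp
  | succ k ih =>
    intro j hj1 hjk acc sl hinv
    have hjn : j < n - 1 := by omega
    rw [PySem.List.pyRange_one_cons hjn]
    simp only [List.foldl_cons]
    obtain ⟨hval, hinv'⟩ := pv_step arr n j acc sl h3 hlen hj1 hjn hinv
    rw [hval]
    have := ih (j+1) (by omega) (by omega)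
      (pvStepB (arr.take n.toNat) (pvSuf (arr.take n.toNat)) (sl, acc) j).2
      (pvStepB (arr.take n.toNat) (pvSuf (arr.take n.toNat)) (sl, acc) j).1 hinv'
    simpa using this

-- ===== VERDICT (by name: the statement is the Claim_ definition above) =====
theorem maxSumTriplet_spec : Claim_equal_maxSumTriplet := by
  intro n arr _ hpre
  unfold Spec_maxSumTriplet maxSumTriplet maxSumTriplet_alt
  by_cases h3 : 3 ≤ n
  · have hlen := hpre h3
    rw [if_neg (by omega), PySem.List.slice_to arr (by omega)]
    have hinit : pvInv ((arr.take n.toNat).take (1:Int).toNat)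
        [PySem.List.pyGetD (arr.take n.toNat) 0 0] := by
      have hlen0 : 0 < (arr.take n.toNat).length := by simp; omega
      have : PySem.List.pyGetD (arr.take n.toNat) 0 0 = (arr.take n.toNat)[0]'hlen0 := by
        rw [PySem.List.pyGetD_eq_getElem _ 0 (by omega) (by omega)]
        simp
      rw [this]
      have h1 : (arr.take n.toNat).take (1:Int).toNat = [(arr.take n.toNat)[0]] := by
        simp [List.take_add_one, List.getElem?_eq_getElem hlen0]
      rw [h1]
      exact ⟨List.Perm.refl _, by simp⟩
    have := pv_main arr n h3 hlen (n-2).toNat 1 (by omega) (by omega) 0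
      [PySem.List.pyGetD (arr.take n.toNat) 0 0] hinit
    simpa using this
  · rw [PySem.List.pyRange_one_eq_nil (by omega), if_pos (by omega)]
    simp
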